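-- pv_equiv track=rewrite | github.com/pigscript/pigscript | autodraw1.1.py | parse
-- ===== SOURCE A (Python) =====
-- def parse(pixblock, ind, minlength=0):
-- 	color_list = [(0,0,0),(255,0,0),(0,255,0),(0,0,255),(255,255,0),(255,0,255),(0,255,255),(255,255,255),(128,128,128)]
-- 	tolerance = [128, 128, 128, 128, 128, 128, 128, 128, 400]
-- 	segments=[]
-- 	height=len(pixblock)
-- 	width=len(pixblock[0])
-- 	red,green,blue=color_list[ind]
-- 	tol = tolerance[ind]
-- 	for j in range(height):
-- 		flag = 0
-- 		for i in range(width):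
-- 			r,g,b,a = pixblock[j][i]
-- 			if abs(red-r)+abs(green-g)+abs(blue-b) <= tol and a>150:
-- 				pixblock[j][i] = (255,255,255,0)
-- 				if flag==0:
-- 					flag = 1
-- 					xl = i
-- 			else:
-- 				if flag==1:
-- 					flag=0
-- 					xr = i-1
-- 					if xr-xl>=minlength:
-- 						segments.append((j,xl,xr))
-- 		if flag==1:
-- 			xr=i
-- 			if xr-xl>=minlength:
-- 				segments.append((j,xl,xr))
-- 	return segments, pixblock
-- ===== SOURCE B (Python) =====
-- def parse(pixblock, ind, minlength=0):
--     color_list = [(0,0,0),(255,0,0),(0,255,0),(0,0,255),(255,255,0),(255,0,255),(0,255,255),(255,255,255),(128,128,128)]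
--     tolerance = [128, 128, 128, 128, 128, 128, 128, 128, 400]
--     red, green, blue = color_list[ind]
--     tol = tolerance[ind]
--     width = len(pixblock[0])
--     segments = []
--     result = []
--     for j, row in enumerate(pixblock):
--         mask = [abs(red-r)+abs(green-g)+abs(blue-b) <= tol and a > 150
--                 for (r, g, b, a) in row[:width]]
--         result.append([(255, 255, 255, 0) if m else p for p, m in zip(row, mask)]
--                       + row[width:])
--         i = 0
--         while i < width:
--             if mask[i]:
--                 start = i
--                 while i < width and mask[i]:
--                     i += 1
--                 if i - 1 - start >= minlength:
--                     segments.append((j, start, i - 1))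
--             else:
--                 i += 1
--     return segments, result
-- ===== Notes on version B (the rewrite author's own statement) =====
-- stated objective: alternative
-- what changed: Replaced the in-place flag/xl state machine that interleaves whitening and run detection with a per-row boolean match mask: whitening is a zip over the mask, and segments come from a separate run scan (skip/consume-run two-pointer loop) over the mask; B builds a fresh pixel list instead of mutating the argument.
import Mathlib
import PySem

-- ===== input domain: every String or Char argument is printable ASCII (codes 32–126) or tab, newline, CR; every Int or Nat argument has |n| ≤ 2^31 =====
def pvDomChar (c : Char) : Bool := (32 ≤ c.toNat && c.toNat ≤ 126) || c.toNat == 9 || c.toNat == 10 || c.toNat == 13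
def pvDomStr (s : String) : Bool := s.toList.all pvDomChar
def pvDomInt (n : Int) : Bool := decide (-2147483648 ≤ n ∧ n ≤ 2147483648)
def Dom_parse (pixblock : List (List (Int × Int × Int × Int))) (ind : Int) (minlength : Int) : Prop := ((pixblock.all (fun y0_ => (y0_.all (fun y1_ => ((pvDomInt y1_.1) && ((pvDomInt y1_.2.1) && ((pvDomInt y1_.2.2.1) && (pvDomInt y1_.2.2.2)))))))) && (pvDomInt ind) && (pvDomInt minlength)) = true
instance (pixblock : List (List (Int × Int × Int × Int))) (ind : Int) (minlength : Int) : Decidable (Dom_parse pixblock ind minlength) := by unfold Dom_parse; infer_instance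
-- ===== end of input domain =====

-- B replaces A's in-place flag/xl state machine by a per-row match mask (whitening via zip,
-- segments via a separate run scan over the mask); same return value, but A mutates its
-- pixblock argument in place while B builds a fresh list — the equivalence is about the
-- RETURN value (which for A includes the mutated list).

-- ===== PORT A =====
def pvColorList : List (Int × Int × Int) :=
  [(0,0,0),(255,0,0),(0,255,0),(0,0,255),(255,255,0),(255,0,255),(0,255,255),(255,255,255),(128,128,128)]
def pvTolerance : List Int := [128,128,128,128,128,128,128,128,400]
def pvWhite : Int × Int × Int × Int := (255,255,255,0)
-- the shared pixel test 'abs(red-r)+abs(green-g)+abs(blue-b) <= tol and a>150'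
def pvMatch (red green blue tol : Int) (p : Int × Int × Int × Int) : Bool :=
  decide (|red - p.1| + |green - p.2.1| + |blue - p.2.2.1| ≤ tol ∧ p.2.2.2 > 150)

-- A's inner 'for i in range(width)' loop: state = (current row, flag, xl, segments);
-- the final 'if flag==1' flush (where Python's i = width-1) is the terminal case.
def pvLoopA (red green blue tol : Int) (w : Nat) (j minlength : Int) (i : Nat)
    (row : List (Int × Int × Int × Int)) (flag : Bool) (xl : Int)
    (segs : List (Int × Int × Int)) : List (Int × Int × Int × Int) × List (Int × Int × Int) :=
  if h : i < w then
    let p := row.getD i (0,0,0,0)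
    if pvMatch red green blue tol p then
      pvLoopA red green blue tol w j minlength (i+1) (row.set i pvWhite) true
        (if flag then xl else (i : Int)) segs
    else if flag then
      pvLoopA red green blue tol w j minlength (i+1) row false xl
        (segs ++ (if (i : Int) - 1 - xl ≥ minlength then [(j, xl, (i : Int) - 1)] else []))
    else
      pvLoopA red green blue tol w j minlength (i+1) row false xl segs
  else
    (row, segs ++ (if flag then (if (w : Int) - 1 - xl ≥ minlength then [(j, xl, (w : Int) - 1)] else []) else []))
termination_by w - i
decreasing_by all_goals omega

def parse (pixblock : List (List (Int × Int × Int × Int))) (ind : Int) (minlength : Int) :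
    (List (Int × Int × Int)) × (List (List (Int × Int × Int × Int))) :=
  let rgb := (PySem.List.pyGet? pvColorList ind).getD (0, 0, 0)
  let tol := (PySem.List.pyGet? pvTolerance ind).getD 0
  let height := pixblock.length
  let width := (pixblock.headD []).length
  (List.range height).foldl
    (fun st j =>
      let row := st.2.getD j []
      let res := pvLoopA rgb.1 rgb.2.1 rgb.2.2 tol width (j : Int) minlength 0 row false 0 st.1
      (res.2, st.2.set j res.1))
    ([], pixblock)

-- ===== PORT B =====
-- Source B's 'while i < width' run scan over the row's match mask: skip a False,
-- or consume a whole run of Trues ('while i < width and mask[i]: i += 1') in one step.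
def pvScanB (j minlength : Int) : List Bool → Nat → List (Int × Int × Int)
  | [], _ => []
  | b :: t, i =>
    if b then
      let k := (t.takeWhile id).length
      let iEnd := i + 1 + k
      (if (iEnd : Int) - 1 - (i : Int) ≥ minlength then [(j, (i : Int), (iEnd : Int) - 1)] else [])
        ++ pvScanB j minlength (t.dropWhile id) iEnd
    else pvScanB j minlength t (i + 1)
termination_by mask _ => mask.length
decreasing_by
  · exact Nat.lt_succ_of_le (t.length_dropWhile_le id)
  · simp

def parse_alt (pixblock : List (List (Int × Int × Int × Int))) (ind : Int) (minlength : Int) :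
    (List (Int × Int × Int)) × (List (List (Int × Int × Int × Int))) :=
  let rgb := (PySem.List.pyGet? pvColorList ind).getD (0, 0, 0)
  let tol := (PySem.List.pyGet? pvTolerance ind).getD 0
  let width := (pixblock.headD []).length
  (PySem.List.enumerate pixblock 0).foldl
    (fun st jr =>
      let mask := (jr.2.take width).map (pvMatch rgb.1 rgb.2.1 rgb.2.2 tol)
      let newrow := ((jr.2.zip mask).map (fun pm => if pm.2 then pvWhite else pm.1)) ++ jr.2.drop width
      (st.1 ++ pvScanB jr.1 minlength mask 0, st.2 ++ [newrow]))
    ([], [])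

-- ===== PRECONDITION & SPEC =====
-- Pre_ excludes exactly the inputs where the Python A raises IndexError: an empty pixblock
-- (pixblock[0]), ind outside [-9, 8] (color_list[ind]) and any row shorter than the first
-- row's length (pixblock[j][i]); Python B raises on exactly the same inputs.
def Pre_parse (pixblock : List (List (Int × Int × Int × Int))) (ind : Int) (minlength : Int) : Prop :=
  pixblock ≠ [] ∧ PySem.Raise.InRange 9 ind ∧
    ∀ row ∈ pixblock, (pixblock.headD []).length ≤ row.length
instance (pixblock : List (List (Int × Int × Int × Int))) (ind : Int) (minlength : Int) : Decidable (Pre_parse pixblock ind minlength) := by unfold Pre_parse; infer_instance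

def pvWitness_parse : (List (List (Int × Int × Int × Int))) × Int × Int :=
  ([[(0,0,0,200),(9,9,9,100)],[(255,255,255,200),(0,0,0,200)]], 0, 0)

def Spec_parse (pixblock : List (List (Int × Int × Int × Int))) (ind : Int) (minlength : Int) (out : (List (Int × Int × Int)) × (List (List (Int × Int × Int × Int)))) : Prop := out = parse_alt pixblock ind minlength
instance (pixblock : List (List (Int × Int × Int × Int))) (ind : Int) (minlength : Int) (out : (List (Int × Int × Int)) × (List (List (Int × Int × Int × Int)))) : Decidable (Spec_parse pixblock ind minlength out) := by unfold Spec_parse; infer_instance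

-- ===== CLAIM (what is proved, stated in full; the proofs are below) =====
def Claim_equal_parse : Prop := ∀ (pixblock : List (List (Int × Int × Int × Int))) (ind : Int) (minlength : Int), Dom_parse pixblock ind minlength → Pre_parse pixblock ind minlength → Spec_parse pixblock ind minlength (parse pixblock ind minlength)

-- ===== LEMMAS AND PROOFS =====

-- Reference run scan: A's flag automaton, but structural on the row's boolean match mask.
def refSegs (j ml : Int) : List Bool → Nat → Bool → Int → List (Int × Int × Int)
  | [], i, flag, xl =>
      if flag then (if (i : Int) - 1 - xl ≥ ml then [(j, xl, (i : Int) - 1)] else []) else []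
  | b :: t, i, flag, xl =>
      if b then refSegs j ml t (i+1) true (if flag then xl else (i : Int))
      else if flag then
        (if (i : Int) - 1 - xl ≥ ml then [(j, xl, (i : Int) - 1)] else []) ++ refSegs j ml t (i+1) false xl
      else refSegs j ml t (i+1) false xl

lemma pvLoopA_spec (red green blue tol : Int) (w : Nat) (j ml : Int) :
    ∀ n i row flag xl segs, w - i ≤ n → i ≤ w → w ≤ row.length →
    pvLoopA red green blue tol w j ml i row flag xl segs =
      (row.take i ++ ((row.drop i).take (w - i)).map
          (fun p => if pvMatch red green blue tol p then pvWhite else p) ++ row.drop w,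
       segs ++ refSegs j ml (((row.drop i).take (w - i)).map (pvMatch red green blue tol)) i flag xl) := by
  intro n
  induction n with
  | zero =>
    intro i row flag xl segs hn hi hw
    have hiw : i = w := by omega
    subst hiw
    rw [pvLoopA, dif_neg (by omega : ¬ i < i)]
    simp [refSegs, List.take_append_drop]
  | succ n ih =>
    intro i row flag xl segs hn hi hw
    by_cases hiw : i < w
    · have hlt : i < row.length := lt_of_lt_of_le hiw hw
      have hdropi : row.drop i = row[i] :: row.drop (i+1) := List.drop_eq_getElem_cons hlt
      have hgetD : row.getD i (0,0,0,0) = row[i] := by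
        simp [List.getD_eq_getElem?_getD, List.getElem?_eq_getElem hlt]
      have hwi : w - i = (w - (i+1)) + 1 := by omega
      have hmask : (row.drop i).take (w - i) = row[i] :: (row.drop (i+1)).take (w - (i+1)) := by
        rw [hdropi, hwi, List.take_succ_cons]
      rw [pvLoopA, dif_pos hiw]
      simp only [hgetD]
      by_cases hp : pvMatch red green blue tol row[i]
      · rw [if_pos hp]
        have hset : row.set i pvWhite = row.take i ++ pvWhite :: row.drop (i+1) :=
          List.set_eq_take_cons_drop pvWhite hlt
        have hlentake : (row.take i).length = i := by simp; omega
        have hB : (row.set i pvWhite).drop (i+1) = row.drop (i+1) := by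
          rw [hset, List.drop_append, hlentake,
              List.drop_eq_nil_of_le (by omega : (row.take i).length ≤ i+1)]
          simp [hlentake]
        have hA : (row.set i pvWhite).take (i+1) = row.take i ++ [pvWhite] := by
          rw [hset, List.take_append, hlentake]
          simp [List.take_take, hlentake]
        have hC : (row.set i pvWhite).drop w = row.drop w := by
          have h1 : (row.set i pvWhite).drop w = ((row.set i pvWhite).drop (i+1)).drop (w - (i+1)) := by
            rw [List.drop_drop]; congr 1; omega
          rw [h1, hB, List.drop_drop]; congr 1; omega
        rw [ih (i+1) (row.set i pvWhite) true (if flag then xl else (i:Int)) segs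
            (by omega) (by omega) (by simpa using hw)]
        rw [Prod.mk.injEq]; refine ⟨?_, ?_⟩
        · rw [hA, hB, hC, hmask]
          simp [hp]
        · rw [hB, hmask]
          simp [refSegs, hp]
      · rw [if_neg hp]
        have htake1 : row.take (i+1) = row.take i ++ [row[i]] := by
          rw [List.take_add_one, List.getElem?_eq_getElem hlt]; rfl
        by_cases hf : flag
        · subst hf
          rw [if_pos rfl,
            ih (i+1) row false xl _ (by omega) (by omega) hw]
          rw [Prod.mk.injEq]; refine ⟨?_, ?_⟩
          · rw [hmask]; simp [hp]; rw [htake1, List.append_assoc]; rfl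
          · rw [hmask]; simp [refSegs, hp, List.append_assoc]
        · have hf' : flag = false := by simpa using hf
          subst hf'
          rw [if_neg (by simp), ih (i+1) row false xl segs (by omega) (by omega) hw]
          rw [Prod.mk.injEq]; refine ⟨?_, ?_⟩
          · rw [hmask]; simp [hp]; rw [htake1, List.append_assoc]; rfl
          · rw [hmask]; simp [refSegs, hp]
    · have hiw' : i = w := by omega
      subst hiw'
      rw [pvLoopA, dif_neg (by omega : ¬ i < i)]
      simp [refSegs, List.take_append_drop]

lemma refSegs_scan (j ml : Int) : ∀ (mask : List Bool),
    (∀ i xl, refSegs j ml mask i false xl = pvScanB j ml mask i) ∧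
    (∀ (i : Nat) (s : Int), refSegs j ml mask i true s =
      (if (i : Int) + ((mask.takeWhile id).length : Int) - 1 - s ≥ ml
       then [(j, s, (i : Int) + ((mask.takeWhile id).length : Int) - 1)] else [])
      ++ pvScanB j ml (mask.dropWhile id) (i + (mask.takeWhile id).length)) := by
  intro mask
  induction mask with
  | nil =>
    constructor
    · intro i xl; simp [refSegs, pvScanB]
    · intro i s; simp [refSegs, pvScanB, List.takeWhile, List.dropWhile]
  | cons b t ih =>
    obtain ⟨ih1, ih2⟩ := ih
    constructor
    · intro i xl
      by_cases hb : b
      · subst hb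
        rw [show refSegs j ml (true :: t) i false xl = refSegs j ml t (i+1) true (i : Int) from rfl,
            ih2]
        rw [pvScanB]
        simp only []
        have h1 : ((i:Int)+1) + ((t.takeWhile id).length : Int) - 1 - (i:Int)
            = ((i + 1 + (t.takeWhile id).length : Nat) : Int) - 1 - (i : Int) := by push_cast; ring
        have h2 : ((i+1:Nat) : Int) + ((t.takeWhile id).length : Int) - 1
            = ((i + 1 + (t.takeWhile id).length : Nat) : Int) - 1 := by push_cast; ring
        have h3 : (i+1) + (t.takeWhile id).length = i + 1 + (t.takeWhile id).length := rfl
        rw [h2, h3]; simp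
      · have hb' : b = false := by simpa using hb
        subst hb'
        rw [show refSegs j ml (false :: t) i false xl = refSegs j ml t (i+1) false xl from rfl, ih1]
        rw [pvScanB]; simp
    · intro i s
      by_cases hb : b
      · subst hb
        rw [show refSegs j ml (true :: t) i true s = refSegs j ml t (i+1) true s from rfl, ih2]
        have htw : (true :: t).takeWhile id = true :: t.takeWhile id := by simp [List.takeWhile]
        have hdw : (true :: t).dropWhile id = t.dropWhile id := by simp [List.dropWhile]
        rw [htw, hdw]
        have h2 : ((i+1:Nat) : Int) + ((t.takeWhile id).length : Int) - 1
            = (i : Int) + (((true :: t.takeWhile id).length : Nat) : Int) - 1 := by push_cast [List.length_cons]; ring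
        have h3 : (i+1) + (t.takeWhile id).length = i + (true :: t.takeWhile id).length := by
          simp [List.length_cons]; omega
        rw [h2, h3]
      · have hb' : b = false := by simpa using hb
        subst hb'
        rw [show refSegs j ml (false :: t) i true s
            = (if (i : Int) - 1 - s ≥ ml then [(j, s, (i : Int) - 1)] else []) ++ refSegs j ml t (i+1) false s from rfl,
          ih1]
        have htw : (false :: t).takeWhile id = [] := by simp [List.takeWhile]
        have hdw : (false :: t).dropWhile id = false :: t := by simp [List.dropWhile]
        rw [htw, hdw]
        rw [show ([] : List Bool).length = 0 from rfl,
            show pvScanB j ml (false :: t) (i + 0) = pvScanB j ml t (i+1) from by rw [pvScanB]; simp]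
        norm_num

lemma zip_whiten (f : (Int × Int × Int × Int) → Bool) :
    ∀ (l extra : List (Int × Int × Int × Int)),
    ((l ++ extra).zip (l.map f)).map (fun pm => if pm.2 then pvWhite else pm.1) =
      l.map (fun p => if f p then pvWhite else p) := by
  intro l
  induction l with
  | nil => intro extra; simp
  | cons a t ih => intro extra; simp [ih]

lemma pvGetMid' {alpha : Type} {A : List alpha} {n : Nat} (h : A.length = n)
    (c : alpha) (B : List alpha) (d : alpha) : (A ++ c :: B).getD n d = c := by
  subst h
  induction A with
  | nil => rfl
  | cons a t ih => simpa using ih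

lemma pvSetMid' {alpha : Type} {A : List alpha} {n : Nat} (h : A.length = n)
    (c : alpha) (B : List alpha) (x : alpha) : (A ++ c :: B).set n x = A ++ x :: B := by
  subst h
  induction A with
  | nil => rfl
  | cons a t ih => simpa using ih

lemma outerA (red green blue tol : Int) (w : Nat) (ml : Int)
    (pixblock : List (List (Int × Int × Int × Int)))
    (Hrows : ∀ row ∈ pixblock, w ≤ row.length) :
    ∀ n, n ≤ pixblock.length →
    (List.range n).foldl
      (fun st (jj : Nat) =>
        let row := st.2.getD jj []
        let res := pvLoopA red green blue tol w (jj : Int) ml 0 row false 0 st.1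
        (res.2, st.2.set jj res.1))
      (([] : List (Int × Int × Int)), pixblock) =
      ((PySem.List.enumerate (pixblock.take n) 0).flatMap
         (fun jr => refSegs jr.1 ml ((jr.2.take w).map (pvMatch red green blue tol)) 0 false 0),
       (pixblock.take n).map
         (fun row => (row.take w).map (fun p => if pvMatch red green blue tol p then pvWhite else p)
            ++ row.drop w)
         ++ pixblock.drop n) := by
  intro n
  induction n with
  | zero => intro _; simp [PySem.List.enumerate]
  | succ n ih =>
    intro h
    have hn : n < pixblock.length := by omega
    rw [List.range_succ, List.foldl_append, ih (by omega), List.foldl_cons, List.foldl_nil]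
    have hlen : ((pixblock.take n).map
        (fun row => (row.take w).map (fun p => if pvMatch red green blue tol p then pvWhite else p)
            ++ row.drop w)).length = n := by simp; omega
    have hdropn : pixblock.drop n = pixblock[n] :: pixblock.drop (n+1) := List.drop_eq_getElem_cons hn
    have htk : pixblock.take (n+1) = pixblock.take n ++ [pixblock[n]] := by
      rw [List.take_add_one, List.getElem?_eq_getElem hn]; rfl
    simp only [hdropn]
    rw [pvGetMid' hlen, pvSetMid' hlen]
    rw [pvLoopA_spec red green blue tol w (n : Int) ml w 0 pixblock[n] false 0 _
        (by omega) (by omega) (Hrows pixblock[n] (List.getElem_mem hn))]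
    rw [htk, PySem.List.enumerate_append, List.flatMap_append]
    have hmin : min ((n : Int)) ((pixblock.length : Int)) = (n : Int) := by omega
    simp [PySem.List.enumerate_cons, PySem.List.enumerate, List.append_assoc, hmin,
      List.map_take, min_eq_left hn.le]
    rw [List.take_add_one]
    simp [List.getElem?_eq_getElem hn, List.append_assoc]



lemma outerB (red green blue tol : Int) (w : Nat) (ml : Int) :
    ∀ (l : List (List (Int × Int × Int × Int))) (s : Int)
      (acc1 : List (Int × Int × Int)) (acc2 : List (List (Int × Int × Int × Int))),
    (PySem.List.enumerate l s).foldl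
      (fun st jr =>
        let mask := (jr.2.take w).map (pvMatch red green blue tol)
        let newrow := ((jr.2.zip mask).map (fun pm => if pm.2 then pvWhite else pm.1)) ++ jr.2.drop w
        (st.1 ++ pvScanB jr.1 ml mask 0, st.2 ++ [newrow])) (acc1, acc2)
    = (acc1 ++ (PySem.List.enumerate l s).flatMap
          (fun jr => pvScanB jr.1 ml ((jr.2.take w).map (pvMatch red green blue tol)) 0),
       acc2 ++ l.map
          (fun row => ((row.zip ((row.take w).map (pvMatch red green blue tol))).map
              (fun pm => if pm.2 then pvWhite else pm.1)) ++ row.drop w)) := by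
  intro l
  induction l with
  | nil => intro s acc1 acc2; simp [PySem.List.enumerate]
  | cons r t ih =>
    intro s acc1 acc2
    rw [PySem.List.enumerate_cons, List.foldl_cons]
    rw [ih]
    simp [PySem.List.enumerate_cons, List.append_assoc]

theorem parse_spec : Claim_equal_parse := by
  intro pixblock ind minlength _hDom hPre
  obtain ⟨hne, hind, hrows⟩ := hPre
  show parse pixblock ind minlength = parse_alt pixblock ind minlength
  unfold parse parse_alt
  simp only []
  rw [outerA _ _ _ _ _ _ pixblock hrows pixblock.length (le_refl _),
      outerB _ _ _ _ _ _ pixblock 0 [] []]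
  have hfun : ∀ (jv : Int) (m : List Bool),
      refSegs jv minlength m 0 false 0 = pvScanB jv minlength m 0 :=
    fun jv m => (refSegs_scan jv minlength m).1 0 0
  have hrow : ∀ (row : List (Int × Int × Int × Int)) (f : (Int × Int × Int × Int) → Bool),
      ((row.zip ((row.take ((pixblock.headD []).length)).map f)).map
          (fun pm => if pm.2 then pvWhite else pm.1)) =
        (row.take ((pixblock.headD []).length)).map (fun p => if f p then pvWhite else p) := by
    intro row f
    have h2 := zip_whiten f (row.take ((pixblock.headD []).length))
        (row.drop ((pixblock.headD []).length))
    rwa [List.take_append_drop] at h2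
  simp [hfun]
  intro a ha
  simp only [← List.map_take]
  simp only [List.headD_eq_head?_getD] at hrow
  exact (hrow a _).symm
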